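-- pv_equiv track=rewrite | github.com/Smiledeadmen/HW-py-function | main.py | people
-- ===== SOURCE A (Python) =====
-- documents = [
--     {"type": "passport", "number": "2207 876234", "name": "Василий Гупкин"},
--     {"type": "invoice", "number": "11-2", "name": "Геннадий Покемонов"},
--     {"type": "insurance", "number": "10006", "name": "Аристарх Павлов"}
-- ]
--
-- def people(inp):
--     num_list = []
--     for num in documents:
--         num_list.append(num["number"])
--     if inp in num_list:
--         name = next(x for x in documents if x["number"] == inp)
--         return name["name"]
--     else:
--         return "Такого номера документа нет"
-- ===== SOURCE B (Python) =====
-- documents = [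
--     {"type": "passport", "number": "2207 876234", "name": "Василий Гупкин"},
--     {"type": "invoice", "number": "11-2", "name": "Геннадий Покемонов"},
--     {"type": "insurance", "number": "10006", "name": "Аристарх Павлов"}
-- ]
--
-- def people(inp):
--     for doc in documents:
--         if doc["number"] == inp:
--             return doc["name"]
--     return "Такого номера документа нет"
-- ===== Notes on version B (the rewrite author's own statement) =====
-- stated objective: simpler
-- what changed: Replaced A's three-scan pipeline (build num_list, membership test, then a next() rescan for the matching document) by one direct pass over documents that returns the first matching name.
import Mathlib
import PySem

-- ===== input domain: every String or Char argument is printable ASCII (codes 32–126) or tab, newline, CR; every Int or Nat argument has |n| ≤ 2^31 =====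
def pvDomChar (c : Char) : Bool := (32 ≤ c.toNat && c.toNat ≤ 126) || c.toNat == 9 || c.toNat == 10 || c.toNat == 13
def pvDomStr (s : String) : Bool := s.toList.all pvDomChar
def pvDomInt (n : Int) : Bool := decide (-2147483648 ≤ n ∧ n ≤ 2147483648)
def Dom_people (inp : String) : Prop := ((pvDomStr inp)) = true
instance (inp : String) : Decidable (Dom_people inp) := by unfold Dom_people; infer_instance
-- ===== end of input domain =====

-- B replaces A's build-num_list + membership + next() rescan with one direct pass over documents (simpler).

-- ===== PORT A =====
-- documents: list of (type, number, name) dicts, ported as triples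
def pvDocuments : List (String × String × String) :=
  [("passport", "2207 876234", "Василий Гупкин"),
   ("invoice", "11-2", "Геннадий Покемонов"),
   ("insurance", "10006", "Аристарх Павлов")]

def people (inp : String) : String :=
  let numList := pvDocuments.foldl (fun acc num => acc ++ [num.2.1]) []
  if numList.contains inp then
    -- next(x for x in documents if x["number"] == inp); membership guarantees a match,
    -- so the none branch is unreachable (Python would raise StopIteration there)
    match pvDocuments.find? (fun x => x.2.1 == inp) with
    | some name => name.2.2
    | none => ""
  else
    "Такого номера документа нет"

-- ===== PORT B =====
def peopleAltAux (inp : String) : List (String × String × String) → String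
  | [] => "Такого номера документа нет"
  | doc :: rest => if doc.2.1 == inp then doc.2.2 else peopleAltAux inp rest

def people_alt (inp : String) : String := peopleAltAux inp pvDocuments

-- ===== PRECONDITION & SPEC =====
def Spec_people (inp : String) (out : String) : Prop := out = people_alt inp
instance (inp : String) (out : String) : Decidable (Spec_people inp out) := by unfold Spec_people; infer_instance

-- ===== CLAIM (what is proved, stated in full; the proofs are below) =====
def Claim_equal_people : Prop := ∀ (inp : String), Dom_people inp → Spec_people inp (people inp)

-- ===== LEMMAS AND PROOFS =====

-- A's pipeline over ANY document list equals B's single pass, by induction on the list.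
theorem people_general (inp : String) (ds : List (String × String × String)) :
    (if (ds.foldl (fun acc num => acc ++ [num.2.1]) []).contains inp then
      match ds.find? (fun x => x.2.1 == inp) with
      | some name => name.2.2
      | none => ""
    else "Такого номера документа нет") = peopleAltAux inp ds := by
  induction ds with
  | nil => simp [peopleAltAux]
  | cons d rest ih =>
    rw [show (d :: rest).foldl (fun acc num => acc ++ [num.2.1]) [] =
        d.2.1 :: rest.foldl (fun acc num => acc ++ [num.2.1]) [] from by
      simp [List.foldl_cons, List.foldl]]
    by_cases h : d.2.1 = inp
    · simp [peopleAltAux, List.find?, h]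
    · have h1 : (d.2.1 == inp) = false := by simp [h]
      have h2 : (inp == d.2.1) = false := by simp [Ne.symm h]
      simp only [peopleAltAux, List.find?, h1, List.contains_cons, h2, Bool.false_or]
      exact ih

-- ===== VERDICT (by name: the statement is the Claim_ definition above) =====
theorem people_spec : Claim_equal_people := by
  intro inp _
  unfold Spec_people people people_alt
  exact people_general inp pvDocuments
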